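-- pv_equiv track=rewrite | github.com/MarcelaRojas08/Portafolio2 | Portafolio 2.py | mayor_aux
-- ===== SOURCE A (Python) =====
-- def mayor_aux(lista,mayor):
--     if lista == []:
--         return mayor
--     else:
--         if(lista[0]) > mayor:
--             return mayor_aux(lista[1:],lista[0])
--         else:
--             return mayor_aux(lista[1:],mayor)
-- ===== SOURCE B (Python) =====
-- def mayor_aux(lista, mayor):
--     result = mayor
--     for x in lista:
--         if x > result:
--             result = x
--     return result
-- ===== Notes on version B (the rewrite author's own statement) =====
-- stated objective: faster
-- what changed: Replaced the accumulator-passing tail recursion over lista[1:] (which copies the list tail on every step) with a single iterative for-loop updating a local result variable.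
import Mathlib
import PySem

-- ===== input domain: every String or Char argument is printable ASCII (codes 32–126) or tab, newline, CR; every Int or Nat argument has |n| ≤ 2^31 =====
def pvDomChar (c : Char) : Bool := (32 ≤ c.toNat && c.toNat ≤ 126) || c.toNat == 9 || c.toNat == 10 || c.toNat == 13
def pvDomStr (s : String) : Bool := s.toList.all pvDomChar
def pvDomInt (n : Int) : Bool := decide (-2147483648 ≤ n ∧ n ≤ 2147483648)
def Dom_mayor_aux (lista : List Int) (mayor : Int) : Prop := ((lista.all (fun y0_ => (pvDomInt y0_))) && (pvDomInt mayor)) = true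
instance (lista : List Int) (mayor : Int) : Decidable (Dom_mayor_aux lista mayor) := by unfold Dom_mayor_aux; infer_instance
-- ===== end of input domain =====

-- B replaces the tail recursion over lista[1:] (one tail copy per step) with a single iterative loop: faster.

-- ===== PORT A =====
def mayor_aux (lista : List Int) (mayor : Int) : Int :=
  if lista = [] then mayor
  else
    if (PySem.List.pyGet? lista 0).getD 0 > mayor then
      mayor_aux (PySem.List.slice lista (some 1) none) ((PySem.List.pyGet? lista 0).getD 0)
    else
      mayor_aux (PySem.List.slice lista (some 1) none) mayor
termination_by lista.length
decreasing_by
  all_goals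
    simp [PySem.List.slice_from_one]
    cases lista with
    | nil => simp_all
    | cons a t => simp

-- ===== PORT B =====
def mayor_aux_alt (lista : List Int) (mayor : Int) : Int :=
  lista.foldl (fun result x => if x > result then x else result) mayor

-- ===== PRECONDITION & SPEC =====
def Spec_mayor_aux (lista : List Int) (mayor : Int) (out : Int) : Prop := out = mayor_aux_alt lista mayor
instance (lista : List Int) (mayor : Int) (out : Int) : Decidable (Spec_mayor_aux lista mayor out) := by unfold Spec_mayor_aux; infer_instance

-- ===== CLAIM (what is proved, stated in full; the proofs are below) =====
def Claim_equal_mayor_aux : Prop := ∀ (lista : List Int) (mayor : Int), Dom_mayor_aux lista mayor → Spec_mayor_aux lista mayor (mayor_aux lista mayor)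

-- ===== LEMMAS AND PROOFS =====

-- ===== VERDICT (by name: the statement is the Claim_ definition above) =====
theorem mayor_aux_eq_foldl (lista : List Int) (mayor : Int) :
    mayor_aux lista mayor = mayor_aux_alt lista mayor := by
  induction lista generalizing mayor with
  | nil => simp [mayor_aux, mayor_aux_alt]
  | cons a t ih =>
    have hget : (PySem.List.pyGet? (a :: t) 0).getD 0 = a := by
      simp [PySem.List.pyGet?, PySem.List.pyIdx?]
    rw [mayor_aux]
    simp only [PySem.List.slice_from_one, List.tail_cons, reduceCtorEq, if_false, hget]
    simp only [mayor_aux_alt, List.foldl_cons] at *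
    split_ifs with h <;> simp [ih]

theorem mayor_aux_spec : Claim_equal_mayor_aux := by
  intro lista mayor _
  unfold Spec_mayor_aux
  exact mayor_aux_eq_foldl lista mayor
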